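-- pv_equiv track=rewrite | github.com/AllanCSR09/PASCAL | claseLinea.py | invertirNodos
-- ===== SOURCE A (Python) =====
-- def invertirNodos(nodos):
--
--     c = []
--     d = []
--     tamano = len(nodos)
--     for i in range(0, tamano, 2):
--         c.append(nodos[i])
--         d.append(nodos[i + 1])
--
--     c = list(reversed(c))
--     d = list(reversed(d))
--
--     n = []
--     tamano = len(c)
--
--     for i in range(0, tamano):
--         n.append(c[i])
--         n.append(d[i])
--
--     return n
-- ===== SOURCE B (Python) =====
-- def invertirNodos(nodos):
--     rev = nodos[::-1]
--     for i in range(0, len(rev), 2):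
--         rev[i], rev[i + 1] = rev[i + 1], rev[i]
--     return rev
-- ===== Notes on version B (the rewrite author's own statement) =====
-- stated objective: simpler
-- what changed: B reverses the whole list once and swaps adjacent pairs in place in a single indexed pass, instead of splitting into parallel even/odd lists, reversing each, and re-interleaving them.
import Mathlib
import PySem

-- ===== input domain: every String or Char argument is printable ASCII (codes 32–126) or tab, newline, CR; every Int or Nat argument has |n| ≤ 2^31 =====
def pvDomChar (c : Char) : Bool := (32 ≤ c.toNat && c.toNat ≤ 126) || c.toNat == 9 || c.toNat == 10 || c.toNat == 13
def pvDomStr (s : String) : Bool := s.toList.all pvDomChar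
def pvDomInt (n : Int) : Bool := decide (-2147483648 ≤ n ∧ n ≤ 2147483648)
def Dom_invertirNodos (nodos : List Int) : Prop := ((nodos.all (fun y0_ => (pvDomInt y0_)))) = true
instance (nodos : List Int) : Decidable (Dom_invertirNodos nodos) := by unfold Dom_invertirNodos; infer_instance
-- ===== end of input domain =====

-- B reverses the list once and swaps adjacent pairs in one pass, instead of A's
-- split-into-even/odd-lists, reverse-both, re-interleave; simpler, same cost.

-- ===== PORT A =====
-- 'for i in range(0, tamano, 2): c.append(nodos[i]); d.append(nodos[i+1])' as the
-- obvious two-step structural recursion over the list with the same (c, d) state;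
-- the one-element case is where Python raises IndexError (excluded by Pre_).
def pvBuildCD : List Int → List Int → List Int → List Int × List Int
  | [], c, d => (c, d)
  | [_], c, d => (c, d)
  | a :: b :: r, c, d => pvBuildCD r (c ++ [a]) (d ++ [b])

-- 'for i in range(0, tamano): n.append(c[i]); n.append(d[i])' with len c = len d.
def pvBuildN : List Int → List Int → List Int
  | [], _ => []
  | x :: _, [] => [x]
  | x :: c, y :: d => x :: y :: pvBuildN c d

def invertirNodos (nodos : List Int) : List Int :=
  let cd := pvBuildCD nodos [] []
  pvBuildN cd.1.reverse cd.2.reverse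

-- ===== PORT B =====
-- 'rev[i], rev[i+1] = rev[i+1], rev[i]' over range(0, len(rev), 2), as the
-- two-step recursion producing the swapped list; the one-element case is where
-- Python raises IndexError (excluded by Pre_).
def pvSwapPairs : List Int → List Int
  | a :: b :: r => b :: a :: pvSwapPairs r
  | r => r

def invertirNodos_alt (nodos : List Int) : List Int :=
  pvSwapPairs nodos.reverse

-- ===== PRECONDITION & SPEC =====
-- Pre_ excludes exactly the odd-length lists, on which A raises IndexError at nodos[i+1].
def Pre_invertirNodos (nodos : List Int) : Prop := nodos.length % 2 = 0
instance (nodos : List Int) : Decidable (Pre_invertirNodos nodos) := by unfold Pre_invertirNodos; infer_instance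
def pvWitness_invertirNodos : List Int := [1, 2, 3, 4]

def Spec_invertirNodos (nodos : List Int) (out : List Int) : Prop := out = invertirNodos_alt nodos
instance (nodos : List Int) (out : List Int) : Decidable (Spec_invertirNodos nodos out) := by unfold Spec_invertirNodos; infer_instance

-- ===== CLAIM (what is proved, stated in full; the proofs are below) =====
def Claim_equal_invertirNodos : Prop := ∀ (nodos : List Int), Dom_invertirNodos nodos → Pre_invertirNodos nodos → Spec_invertirNodos nodos (invertirNodos nodos)

-- ===== LEMMAS AND PROOFS =====

-- two-elements-at-a-time induction principle used by the proofs below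
theorem pvTwoStep {motive : List Int → Prop} (h0 : motive []) (h1 : ∀ x, motive [x])
    (h2 : ∀ a b r, motive r → motive (a :: b :: r)) : ∀ l, motive l
  | [] => h0
  | [x] => h1 x
  | a :: b :: r => h2 a b r (pvTwoStep h0 h1 h2 r)

theorem pvBuildCD_prefix (r : List Int) : ∀ (c d : List Int),
    pvBuildCD r c d = (c ++ (pvBuildCD r [] []).1, d ++ (pvBuildCD r [] []).2) := by
  induction r using pvTwoStep with
  | h0 => simp [pvBuildCD]
  | h1 x => simp [pvBuildCD]
  | h2 a b r ih =>
    intro c d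
    rw [pvBuildCD, pvBuildCD, ih (c ++ [a]) (d ++ [b]), ih ([] ++ [a]) ([] ++ [b])]
    simp

theorem pvBuildCD_len (r : List Int) (h : r.length % 2 = 0) :
    (pvBuildCD r [] []).1.length = (pvBuildCD r [] []).2.length := by
  induction r using pvTwoStep with
  | h0 => simp [pvBuildCD]
  | h1 x => simp at h
  | h2 a b r ih =>
    have hr : r.length % 2 = 0 := by simp at h; omega
    rw [pvBuildCD, pvBuildCD_prefix r ([] ++ [a]) ([] ++ [b])]
    simp [ih hr]

theorem pvBuildN_append (c d : List Int) (a b : Int) (h : c.length = d.length) :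
    pvBuildN (c ++ [a]) (d ++ [b]) = pvBuildN c d ++ [a, b] := by
  induction c generalizing d with
  | nil => cases d with
    | nil => simp [pvBuildN]
    | cons y d => simp at h
  | cons x c ih => cases d with
    | nil => simp at h
    | cons y d =>
      simp at h
      simp [pvBuildN, ih d h]

theorem pvSwapPairs_append (l m : List Int) (h : l.length % 2 = 0) :
    pvSwapPairs (l ++ m) = pvSwapPairs l ++ pvSwapPairs m := by
  induction l using pvTwoStep with
  | h0 => simp [pvSwapPairs]
  | h1 x => simp at h
  | h2 a b r ih =>
    have hr : r.length % 2 = 0 := by simp at h; omega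
    simp [pvSwapPairs, ih hr]

theorem pv_main (n : ℕ) : ∀ (nodos : List Int), nodos.length = 2 * n →
    invertirNodos nodos = invertirNodos_alt nodos := by
  induction n with
  | zero =>
    intro nodos h
    simp at h
    subst h
    rfl
  | succ n ih =>
    intro nodos h
    match nodos with
    | a :: b :: r =>
      have hr : r.length = 2 * n := by simp at h; omega
      have hr2 : r.length % 2 = 0 := by omega
      have hA : invertirNodos (a :: b :: r) = invertirNodos r ++ [a, b] := by
        show pvBuildN (pvBuildCD (a :: b :: r) [] []).1.reverse (pvBuildCD (a :: b :: r) [] []).2.reverse = _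
        rw [pvBuildCD, pvBuildCD_prefix]
        simp only [List.reverse_cons, List.nil_append, List.singleton_append]
        have := pvBuildN_append (pvBuildCD r [] []).1.reverse (pvBuildCD r [] []).2.reverse a b
          (by simpa using pvBuildCD_len r hr2)
        simpa using this
      have hB : invertirNodos_alt (a :: b :: r) = invertirNodos_alt r ++ [a, b] := by
        show pvSwapPairs (a :: b :: r).reverse = pvSwapPairs r.reverse ++ [a, b]
        have : (a :: b :: r).reverse = r.reverse ++ [b, a] := by simp
        rw [this, pvSwapPairs_append r.reverse [b, a] (by simpa using hr2)]
        rfl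
      rw [hA, hB, ih r hr]
    | [] => simp at h
    | [x] => simp at h; omega

-- ===== VERDICT (by name: the statement is the Claim_ definition above) =====
theorem invertirNodos_spec : Claim_equal_invertirNodos := by
  intro nodos _ hpre
  unfold Pre_invertirNodos at hpre
  have : ∃ n, nodos.length = 2 * n := ⟨nodos.length / 2, by omega⟩
  obtain ⟨n, hn⟩ := this
  exact pv_main n nodos hn
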